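-- pv_equiv track=rewrite | github.com/WenruiYu/ghTrader | src/ghtrader/tq_runtime.py | _canonical_account_profile
-- ===== SOURCE A (Python) =====
-- def _canonical_account_profile(profile: str) -> str:
--     """
--     Canonicalize an account profile identifier.
--
--     - used for locks, run_config.json, and dashboard keys
--     - allows only [a-z0-9_]
--     """
--     p = str(profile or "").strip()
--     if not p:
--         return "default"
--     p = p.lower()
--     out: list[str] = []
--     prev_us = False
--     for ch in p:
--         if ch.isalnum():
--             out.append(ch)
--             prev_us = False
--         else:
--             if not prev_us:
--                 out.append("_")
--                 prev_us = True
--     s = "".join(out).strip("_")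
--     return s or "default"
-- ===== SOURCE B (Python) =====
-- def _canonical_account_profile(profile: str) -> str:
--     """Canonicalize an account profile identifier to [a-z0-9_]."""
--     p = str(profile or "").strip()
--     if not p:
--         return "default"
--     p = p.lower()
--     pieces = []
--     i, n = 0, len(p)
--     while i < n:
--         k = p[i].isalnum()
--         j = i + 1
--         while j < n and p[j].isalnum() == k:
--             j += 1
--         pieces.append(p[i:j] if k else "_")
--         i = j
--     s = "".join(pieces).strip("_")
--     return s or "default"
-- ===== Notes on version B (the rewrite author's own statement) =====
-- stated objective: alternative
-- what changed: Replaced the char-by-char state machine with a prev_us flag by a run-scanning pass: two nested index loops find each maximal run of same isalnum-class characters and emit the run (alnum) or a single '_' (non-alnum), then join/strip as before.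
import Mathlib
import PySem

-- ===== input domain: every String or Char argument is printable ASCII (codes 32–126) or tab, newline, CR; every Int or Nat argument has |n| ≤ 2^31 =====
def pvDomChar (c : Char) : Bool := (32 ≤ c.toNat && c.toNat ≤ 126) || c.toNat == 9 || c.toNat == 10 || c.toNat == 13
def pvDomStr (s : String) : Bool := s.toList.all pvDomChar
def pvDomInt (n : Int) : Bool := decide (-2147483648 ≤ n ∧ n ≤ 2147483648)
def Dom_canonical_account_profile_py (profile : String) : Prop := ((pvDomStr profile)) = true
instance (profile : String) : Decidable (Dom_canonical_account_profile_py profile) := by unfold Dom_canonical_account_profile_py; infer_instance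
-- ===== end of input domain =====

-- B replaces A's prev_us state machine by a run-scanning (groupby-style) pass; alternative decomposition, return value proved equal.

-- ===== PORT A =====
-- A's loop body: out/prev_us state folded over the characters
def pvStepA (s : List Char × Bool) (ch : Char) : List Char × Bool :=
  if PySem.Chars.isalnum ch then (s.1 ++ [ch], false)
  else if s.2 then s
  else (s.1 ++ ['_'], true)

def pvCoreA (pl : List Char) : List Char := (pl.foldl pvStepA ([], false)).1

def canonical_account_profile_py (profile : String) : String :=
  let p := PySem.Chars.strip ((if profile == "" then "" else profile)).toList
  if p = [] then "default"
  else
    let s := PySem.Chars.stripChars (pvCoreA (PySem.Chars.lower p)) ['_']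
    if s = [] then "default" else String.ofList s

-- ===== PORT B =====
-- B's outer while loop: each step consumes one maximal run of same isalnum-class characters
def pvPiecesB (cs : List Char) : List (List Char) :=
  match cs with
  | [] => []
  | c :: rest =>
    (if PySem.Chars.isalnum c
       then c :: rest.takeWhile (fun d => PySem.Chars.isalnum d == PySem.Chars.isalnum c)
       else ['_'])
      :: pvPiecesB (rest.dropWhile (fun d => PySem.Chars.isalnum d == PySem.Chars.isalnum c))
termination_by cs.length
decreasing_by
  simp only [List.length_cons]
  exact Nat.lt_succ_of_le (rest.length_dropWhile_le _)

def pvCoreB (pl : List Char) : List Char := (pvPiecesB pl).flatten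

def canonical_account_profile_py_alt (profile : String) : String :=
  let p := PySem.Chars.strip ((if profile == "" then "" else profile)).toList
  if p = [] then "default"
  else
    let s := PySem.Chars.stripChars (pvCoreB (PySem.Chars.lower p)) ['_']
    if s = [] then "default" else String.ofList s

-- ===== PRECONDITION & SPEC =====
def Spec_canonical_account_profile_py (profile : String) (out : String) : Prop := out = canonical_account_profile_py_alt profile
instance (profile : String) (out : String) : Decidable (Spec_canonical_account_profile_py profile out) := by unfold Spec_canonical_account_profile_py; infer_instance

-- ===== CLAIM (what is proved, stated in full; the proofs are below) =====
def Claim_equal_canonical_account_profile_py : Prop := ∀ (profile : String), Dom_canonical_account_profile_py profile → Spec_canonical_account_profile_py profile (canonical_account_profile_py profile)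

-- ===== LEMMAS AND PROOFS =====

-- A's loop as a structural recursion (proof-side view of the fold)
def pvLoopA : List Char → Bool → List Char
  | [], _ => []
  | c :: cs, prev =>
    if PySem.Chars.isalnum c then c :: pvLoopA cs false
    else if prev then pvLoopA cs true
    else '_' :: pvLoopA cs true

theorem pvFoldA_eq (cs : List Char) : ∀ (acc : List Char) (prev : Bool),
    (cs.foldl pvStepA (acc, prev)).1 = acc ++ pvLoopA cs prev := by
  induction cs with
  | nil => intro acc prev; simp [pvLoopA]
  | cons c cs ih =>
    intro acc prev
    simp only [List.foldl_cons, pvStepA, pvLoopA]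
    by_cases h : PySem.Chars.isalnum c
    · simp [h, ih]
    · cases prev <;> simp [h, ih]

-- an all-alnum prefix is emitted verbatim, leaving the state at prev_us = false
theorem pvLoopA_alnum_prefix (cs : List Char) :
    pvLoopA cs false
      = cs.takeWhile (fun d => PySem.Chars.isalnum d)
          ++ pvLoopA (cs.dropWhile (fun d => PySem.Chars.isalnum d)) false := by
  induction cs with
  | nil => simp
  | cons c cs ih =>
    by_cases h : PySem.Chars.isalnum c
    · simp [pvLoopA, h, ih]
    · simp [h]

-- with prev_us = true a non-alnum run is skipped, and the state resets at the next alnum char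
theorem pvLoopA_skip (cs : List Char) :
    pvLoopA cs true = pvLoopA (cs.dropWhile (fun d => !PySem.Chars.isalnum d)) false := by
  induction cs with
  | nil => simp [pvLoopA]
  | cons c cs ih =>
    by_cases h : PySem.Chars.isalnum c
    · simp [pvLoopA, h]
    · simp [pvLoopA, h, ih]

theorem pvLoopA_eq_pieces (cs : List Char) : pvLoopA cs false = (pvPiecesB cs).flatten := by
  induction cs using pvPiecesB.induct with
  | case1 => simp [pvLoopA, pvPiecesB]
  | case2 c rest ih =>
    by_cases h : PySem.Chars.isalnum c
    · rw [pvPiecesB]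
      simp only [h, if_true, List.flatten_cons]
      have hk : (fun d => PySem.Chars.isalnum d == true)
          = fun d => PySem.Chars.isalnum d := by
        funext d; simp
      simp only [h] at ih
      rw [hk] at ih
      simp only [pvLoopA, h, if_true, List.cons_append]
      rw [pvLoopA_alnum_prefix rest, ih, hk]
    · rw [pvPiecesB]
      simp only [h, Bool.false_eq_true, if_false, List.flatten_cons]
      have hk : (fun d => PySem.Chars.isalnum d == false)
          = fun d => !PySem.Chars.isalnum d := by
        funext d; simp
      have h' : PySem.Chars.isalnum c = false := by simpa using h
      simp only [h'] at ih
      rw [hk] at ih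
      simp only [pvLoopA, h, if_false, Bool.false_eq_true]
      rw [pvLoopA_skip rest, ih]
      simp

theorem pvCore_eq (pl : List Char) : pvCoreA pl = pvCoreB pl := by
  unfold pvCoreA pvCoreB
  rw [pvFoldA_eq, pvLoopA_eq_pieces]
  simp

-- ===== VERDICT (by name: the statement is the Claim_ definition above) =====
theorem canonical_account_profile_py_spec : Claim_equal_canonical_account_profile_py := by
  intro profile _
  unfold Spec_canonical_account_profile_py canonical_account_profile_py canonical_account_profile_py_alt
  simp only [pvCore_eq]
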